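-- pv_equiv track=rewrite | github.com/Alaashoky/lolohop | risk/circuit_breakers.py | _is_correlated
-- ===== SOURCE A (Python) =====
-- def _is_correlated(sym1: str, sym2: str) -> bool:
--     """Check if two symbols are correlated"""
--     # Implement actual correlation logic (e.g., EUR/USD and GBP/USD)
--     correlated_groups = [
--         {'EUR/USD', 'GBP/USD', 'AUD/USD', 'NZD/USD'},  # USD pairs
--         {'XAU/USD', 'XAG/USD'},  # Metals
--         {'US30', 'US500', 'USTEC'},  # Indices
--     ]
--     for group in correlated_groups:
--         if sym1 in group and sym2 in group:
--             return True
--     return False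
-- ===== SOURCE B (Python) =====
-- _GROUP_ID = {
--     'EUR/USD': 0, 'GBP/USD': 0, 'AUD/USD': 0, 'NZD/USD': 0,  # USD pairs
--     'XAU/USD': 1, 'XAG/USD': 1,                              # Metals
--     'US30': 2, 'US500': 2, 'USTEC': 2,                       # Indices
-- }
--
-- def _is_correlated(sym1: str, sym2: str) -> bool:
--     """Check if two symbols are correlated"""
--     g = _GROUP_ID.get(sym1)
--     return g is not None and g == _GROUP_ID.get(sym2)
-- ===== Notes on version B (the rewrite author's own statement) =====
-- stated objective: idiomatic
-- what changed: Replaces the scan over a list of correlation groups with a single symbol-to-group-id dict built once; _is_correlated becomes two lookups and an equality compare, guarded against both symbols being unknown.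
import Mathlib
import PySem

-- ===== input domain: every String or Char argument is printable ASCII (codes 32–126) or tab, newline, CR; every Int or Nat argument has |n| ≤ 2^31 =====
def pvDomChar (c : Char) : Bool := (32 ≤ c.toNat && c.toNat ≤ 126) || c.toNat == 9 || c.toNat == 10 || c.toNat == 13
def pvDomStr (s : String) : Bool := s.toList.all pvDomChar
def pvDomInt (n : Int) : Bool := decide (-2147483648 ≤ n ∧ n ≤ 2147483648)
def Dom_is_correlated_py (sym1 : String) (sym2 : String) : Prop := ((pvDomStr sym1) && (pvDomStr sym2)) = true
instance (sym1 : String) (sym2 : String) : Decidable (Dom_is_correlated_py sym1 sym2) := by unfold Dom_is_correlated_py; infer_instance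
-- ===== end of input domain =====

-- B replaces A's scan over a list of correlation groups by one symbol→group-id dict built once;
-- the call is two lookups and a compare (guarded against both symbols being unknown). Objective: idiomatic.

-- ===== PORT A =====
-- the literal list of set literals from A
def pvGroups : List (PySem.Set String) :=
  [PySem.Set.ofList ["EUR/USD", "GBP/USD", "AUD/USD", "NZD/USD"],
   PySem.Set.ofList ["XAU/USD", "XAG/USD"],
   PySem.Set.ofList ["US30", "US500", "USTEC"]]

-- 'for group in correlated_groups: if sym1 in group and sym2 in group: return True' / 'return False'
def pvScan (sym1 sym2 : String) : List (PySem.Set String) → Bool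
  | [] => false
  | g :: rest =>
      if PySem.Set.contains g sym1 && PySem.Set.contains g sym2 then true
      else pvScan sym1 sym2 rest

def is_correlated_py (sym1 : String) (sym2 : String) : Bool :=
  pvScan sym1 sym2 pvGroups

-- ===== PORT B =====
-- the module-level dict _GROUP_ID from Source B
def pvGroupId : PySem.Dict String Int :=
  PySem.Dict.ofList
    [("EUR/USD", 0), ("GBP/USD", 0), ("AUD/USD", 0), ("NZD/USD", 0),
     ("XAU/USD", 1), ("XAG/USD", 1),
     ("US30", 2), ("US500", 2), ("USTEC", 2)]

-- 'g = _GROUP_ID.get(sym1); return g is not None and g == _GROUP_ID.get(sym2)'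
def is_correlated_py_alt (sym1 : String) (sym2 : String) : Bool :=
  match PySem.Dict.get? pvGroupId sym1 with
  | none => false
  | some g => PySem.Dict.get? pvGroupId sym2 == some g

-- ===== PRECONDITION & SPEC =====
def Spec_is_correlated_py (sym1 : String) (sym2 : String) (out : Bool) : Prop := out = is_correlated_py_alt sym1 sym2
instance (sym1 : String) (sym2 : String) (out : Bool) : Decidable (Spec_is_correlated_py sym1 sym2 out) := by unfold Spec_is_correlated_py; infer_instance

-- ===== CLAIM (what is proved, stated in full; the proofs are below) =====
def Claim_equal_is_correlated_py : Prop := ∀ (sym1 : String) (sym2 : String), Dom_is_correlated_py sym1 sym2 → Spec_is_correlated_py sym1 sym2 (is_correlated_py sym1 sym2)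

-- ===== LEMMAS AND PROOFS =====

-- the nine known symbols
def pvSyms : List String :=
  ["EUR/USD", "GBP/USD", "AUD/USD", "NZD/USD", "XAU/USD", "XAG/USD", "US30", "US500", "USTEC"]

-- A returns false when the first symbol is unknown
lemma pvA_false_left (sym1 sym2 : String) (h : sym1 ∉ pvSyms) :
    is_correlated_py sym1 sym2 = false := by
  simp only [pvSyms, List.mem_cons, List.not_mem_nil, or_false, not_or] at h
  obtain ⟨h1, h2, h3, h4, h5, h6, h7, h8, h9⟩ := h
  simp [is_correlated_py, pvScan, pvGroups, PySem.Set.contains, PySem.Set.ofList,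
        PySem.Set.add, h1, h2, h3, h4, h5, h6, h7, h8, h9]

-- A returns false when the second symbol is unknown
lemma pvA_false_right (sym1 sym2 : String) (h : sym2 ∉ pvSyms) :
    is_correlated_py sym1 sym2 = false := by
  simp only [pvSyms, List.mem_cons, List.not_mem_nil, or_false, not_or] at h
  obtain ⟨h1, h2, h3, h4, h5, h6, h7, h8, h9⟩ := h
  simp [is_correlated_py, pvScan, pvGroups, PySem.Set.contains, PySem.Set.ofList,
        PySem.Set.add, h1, h2, h3, h4, h5, h6, h7, h8, h9]

-- the dict literal's items, computed once
lemma pvGroupId_items : pvGroupId.items =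
    [("EUR/USD", 0), ("GBP/USD", 0), ("AUD/USD", 0), ("NZD/USD", 0),
     ("XAU/USD", 1), ("XAG/USD", 1), ("US30", 2), ("US500", 2), ("USTEC", 2)] := by
  decide

-- an unknown symbol is not a key of the dict
lemma pvGroupId_get?_none (s : String) (h : s ∉ pvSyms) :
    PySem.Dict.get? pvGroupId s = none := by
  simp only [pvSyms, List.mem_cons, List.not_mem_nil, or_false, not_or] at h
  obtain ⟨h1, h2, h3, h4, h5, h6, h7, h8, h9⟩ := h
  rw [PySem.Dict.get?, pvGroupId_items]
  simp [List.find?, beq_eq_false_iff_ne.2 (fun e => h1 e.symm),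
        beq_eq_false_iff_ne.2 (fun e => h2 e.symm),
        beq_eq_false_iff_ne.2 (fun e => h3 e.symm),
        beq_eq_false_iff_ne.2 (fun e => h4 e.symm),
        beq_eq_false_iff_ne.2 (fun e => h5 e.symm),
        beq_eq_false_iff_ne.2 (fun e => h6 e.symm),
        beq_eq_false_iff_ne.2 (fun e => h7 e.symm),
        beq_eq_false_iff_ne.2 (fun e => h8 e.symm),
        beq_eq_false_iff_ne.2 (fun e => h9 e.symm)]

-- B returns false when the first symbol is unknown
lemma pvB_false_left (sym1 sym2 : String) (h : sym1 ∉ pvSyms) :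
    is_correlated_py_alt sym1 sym2 = false := by
  rw [is_correlated_py_alt, pvGroupId_get?_none sym1 h]

-- B returns false when the second symbol is unknown
lemma pvB_false_right (sym1 sym2 : String) (h : sym2 ∉ pvSyms) :
    is_correlated_py_alt sym1 sym2 = false := by
  rw [is_correlated_py_alt, pvGroupId_get?_none sym2 h]
  cases PySem.Dict.get? pvGroupId sym1 <;> simp

-- ===== VERDICT (by name: the statement is the Claim_ definition above) =====
theorem is_correlated_py_spec : Claim_equal_is_correlated_py := by
  intro sym1 sym2 _
  unfold Spec_is_correlated_py
  by_cases h1 : sym1 ∈ pvSyms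
  · by_cases h2 : sym2 ∈ pvSyms
    · fin_cases h1 <;> fin_cases h2 <;> decide
    · rw [pvA_false_right sym1 sym2 h2, pvB_false_right sym1 sym2 h2]
  · rw [pvA_false_left sym1 sym2 h1, pvB_false_left sym1 sym2 h1]
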